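-- pv_equiv track=rewrite | github.com/dodobas/waterboard | django_project/imports/processing/functions.py | construct_discarded_msg
-- ===== SOURCE A (Python) =====
-- def construct_discarded_msg(discarded_rows):
--     """
--     Takes one parameter: "discarded_rows" (list that contains numbers of rows that were discarded)
--
--     Returns string with information about which rows were discarded.
--     """
--
--     discarded_msg = ''
--
--     for ind, item in enumerate(discarded_rows, 1):
--         if len(discarded_rows) == 1:
--             discarded_msg = f'Row {str(item)} was discarded.'
--             return discarded_msg
--
--         if ind == len(discarded_rows):
--             discarded_msg += f' and {str(item)} were discarded.'
--         elif ind == 1: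
--             discarded_msg = f'Rows {str(item)}'
--         else:
--             discarded_msg += f', {str(item)}'
--
--     return discarded_msg
-- ===== SOURCE B (Python) =====
-- def construct_discarded_msg(discarded_rows):
--     if not discarded_rows:
--         return ''
--     if len(discarded_rows) == 1:
--         return f'Row {discarded_rows[0]} was discarded.'
--     *rest, last = discarded_rows
--     return f"Rows {', '.join(str(x) for x in rest)} and {last} were discarded."
-- ===== Notes on version B (the rewrite author's own statement) =====
-- stated objective: simpler
-- what changed: Replaces the enumerate loop with first/middle/last index tests by two base-case guards plus splitting off the last element and one join over the rest.
import Mathlib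
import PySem

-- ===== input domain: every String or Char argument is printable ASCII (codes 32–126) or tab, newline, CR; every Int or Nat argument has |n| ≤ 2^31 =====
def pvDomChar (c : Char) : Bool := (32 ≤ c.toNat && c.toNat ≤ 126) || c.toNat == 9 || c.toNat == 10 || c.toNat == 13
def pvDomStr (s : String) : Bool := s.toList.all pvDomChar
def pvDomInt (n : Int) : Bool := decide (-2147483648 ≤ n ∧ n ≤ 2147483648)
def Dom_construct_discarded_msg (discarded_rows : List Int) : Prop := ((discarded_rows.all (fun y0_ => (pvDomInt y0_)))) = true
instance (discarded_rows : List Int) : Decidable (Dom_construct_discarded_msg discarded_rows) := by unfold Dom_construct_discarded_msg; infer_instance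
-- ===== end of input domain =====

-- B replaces A's enumerate loop (first/middle/last index tests) with two base-case
-- guards plus splitting off the last element and one join over the rest: simpler decomposition.


-- ===== PORT A =====
-- the 'for ind, item in enumerate(discarded_rows, 1)' loop, with the early return
-- of the len == 1 branch; n is len(discarded_rows), msg the accumulator
def pvALoop (n : Int) (pairs : List (Int × Int)) (msg : String) : String :=
  match pairs with
  | [] => msg
  | (ind, item) :: rest =>
    if n = 1 then "Row " ++ PySem.Int.toStr item ++ " was discarded."
    else if ind = n then pvALoop n rest (msg ++ " and " ++ PySem.Int.toStr item ++ " were discarded.")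
    else if ind = 1 then pvALoop n rest ("Rows " ++ PySem.Int.toStr item)
    else pvALoop n rest (msg ++ ", " ++ PySem.Int.toStr item)

def construct_discarded_msg (discarded_rows : List Int) : String :=
  pvALoop (discarded_rows.length : Int) (PySem.List.enumerate discarded_rows 1) ""

-- ===== PORT B =====
def construct_discarded_msg_alt (discarded_rows : List Int) : String :=
  match discarded_rows with
  | [] => ""
  | [x] => "Row " ++ PySem.Int.toStr x ++ " was discarded."
  | _ :: _ :: _ =>
    let rest := discarded_rows.dropLast
    let last := discarded_rows.getLast!
    "Rows " ++ PySem.Str.join ", " (rest.map PySem.Int.toStr) ++ " and " ++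
      PySem.Int.toStr last ++ " were discarded."

-- ===== PRECONDITION & SPEC =====
def Spec_construct_discarded_msg (discarded_rows : List Int) (out : String) : Prop := out = construct_discarded_msg_alt discarded_rows
instance (discarded_rows : List Int) (out : String) : Decidable (Spec_construct_discarded_msg discarded_rows out) := by unfold Spec_construct_discarded_msg; infer_instance

-- ===== CLAIM (what is proved, stated in full; the proofs are below) =====
def Claim_equal_construct_discarded_msg : Prop := ∀ (discarded_rows : List Int), Dom_construct_discarded_msg discarded_rows → Spec_construct_discarded_msg discarded_rows (construct_discarded_msg discarded_rows)

-- ===== LEMMAS AND PROOFS =====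

-- the ", x1, x2, …" middle part of the message, as plain recursion
def pvMid : List Int → String
  | [] => ""
  | y :: ys => ", " ++ PySem.Int.toStr y ++ pvMid ys

theorem pvALoop_spec (ys : List Int) : ∀ (z : Int) (k : Int) (msg : String),
    2 ≤ k →
    pvALoop (k + ys.length) (PySem.List.enumerate (ys ++ [z]) k) msg =
      msg ++ pvMid ys ++ " and " ++ PySem.Int.toStr z ++ " were discarded." := by
  induction ys with
  | nil =>
    intro z k msg hk
    simp only [List.nil_append, PySem.List.enumerate_cons, PySem.List.enumerate_nil,
      List.length_nil, pvMid]
    unfold pvALoop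
    rw [if_neg (by omega), if_pos (by omega)]
    simp [pvALoop]
  | cons y ys ih =>
    intro z k msg hk
    have hlen : ((y :: ys).length : Int) = (ys.length : Int) + 1 := by simp
    simp only [List.cons_append, PySem.List.enumerate_cons, pvALoop, hlen]
    rw [if_neg (by omega), if_neg (by omega), if_neg (by omega)]
    have := ih z (k + 1) (msg ++ ", " ++ PySem.Int.toStr y) (by omega)
    rw [show k + ((ys.length : Int) + 1) = k + 1 + ys.length by omega, this]
    simp [pvMid, String.append_assoc]

theorem alt_cons2 (a b : Int) (l : List Int) :
    construct_discarded_msg_alt (a :: b :: l) =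
      "Rows " ++ PySem.Str.join ", " ((a :: b :: l).dropLast.map PySem.Int.toStr) ++ " and " ++
        PySem.Int.toStr (a :: b :: l).getLast! ++ " were discarded." := rfl

-- join vs pvMid: "Rows x, y1, …" agrees with one join over x :: ys
theorem join_eq_mid (x : Int) (ys : List Int) :
    PySem.Str.join ", " ((x :: ys).map PySem.Int.toStr) =
      PySem.Int.toStr x ++ pvMid ys := by
  induction ys generalizing x with
  | nil => apply String.toList_inj.mp; simp [PySem.Str.toList_join, PySem.Chars.join_singleton, pvMid]
  | cons y ys ih =>
    apply String.toList_inj.mp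
    have h := congrArg String.toList (ih y)
    simp only [PySem.Str.toList_join] at h ⊢
    simp only [List.map_cons, PySem.Chars.join_cons_cons] at h ⊢
    simp only [pvMid, String.toList_append, h]
    simp

theorem construct_discarded_msg_spec : Claim_equal_construct_discarded_msg := by
  intro xs _
  unfold Spec_construct_discarded_msg
  match xs with
  | [] => rfl
  | [x] =>
    simp [construct_discarded_msg, construct_discarded_msg_alt,
      PySem.List.enumerate_cons, PySem.List.enumerate_nil, pvALoop]
  | x :: y :: t =>
    -- write the tail as ys ++ [z]
    obtain ⟨z, ys, hyz⟩ : ∃ (z : Int) (ys : List Int), y :: t = ys ++ [z] := by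
      refine ⟨(y :: t).getLast (by simp), (y :: t).dropLast, ?_⟩
      exact (List.dropLast_append_getLast (by simp)).symm
    rw [alt_cons2, show (x :: y :: t) = x :: (ys ++ [z]) by rw [← hyz]]
    have hlen : ((x :: (ys ++ [z])).length : Int) = 2 + ys.length := by simp; omega
    unfold construct_discarded_msg
    rw [hlen, PySem.List.enumerate_cons]
    unfold pvALoop
    rw [if_neg (by omega), if_neg (by omega), if_pos rfl]
    rw [show (2 : Int) + ys.length = 1 + 1 + ys.length by omega,
      pvALoop_spec ys z (1 + 1) _ (by omega)]
    have hdrop : (x :: (ys ++ [z])).dropLast = x :: ys := by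
      rw [show x :: (ys ++ [z]) = (x :: ys) ++ [z] from by simp]
      exact List.dropLast_concat ..
    have hlast : (x :: (ys ++ [z])).getLast! = z := by
      rw [show x :: (ys ++ [z]) = (x :: ys) ++ [z] from by simp,
        List.getLast!_eq_getLast?_getD, List.getLast?_concat]
      rfl
    rw [hdrop, hlast, join_eq_mid]
    simp [String.append_assoc]
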